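-- pv_equiv track=rewrite | github.com/vibaiher/riff | riff/ai/responder.py | _detect_scale
-- ===== SOURCE A (Python) =====
-- from typing import Dict, List, Optional, Tuple
--
-- def _detect_scale(pcs: List[int]) -> set[int]:
--     """Detect the most likely scale from accumulated pitch classes."""
--     if not pcs:
--         return set(range(12))
--     unique = set(pcs)
--     major = [0, 2, 4, 5, 7, 9, 11]
--     minor = [0, 2, 3, 5, 7, 8, 10]
--     best_root = 0
--     best_mode = major
--     best_score = -1
--     for root in range(12):
--         for mode in (major, minor):
--             scale_pcs = {(root + s) % 12 for s in mode}
--             score = len(unique & scale_pcs)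
--             if score > best_score:
--                 best_score = score
--                 best_root = root
--                 best_mode = mode
--     return {(best_root + s) % 12 for s in best_mode}
-- ===== SOURCE B (Python) =====
-- MAJOR = [0, 2, 4, 5, 7, 9, 11]
-- MINOR = [0, 2, 3, 5, 7, 8, 10]
--
-- def _detect_scale(pcs):
--     """Detect the most likely scale by tallying, per candidate (root, mode), how many
--     observed pitch classes it contains, then taking the first best candidate."""
--     if not pcs:
--         return set(range(12))
--     tally = {}
--     for p in set(pcs):
--         if 0 <= p < 12:
--             for i, mode in enumerate((MAJOR, MINOR)):
--                 for s in mode: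
--                     key = ((p - s) % 12, i)
--                     tally[key] = tally.get(key, 0) + 1
--     best_root, best_mode, best_score = 0, MAJOR, -1
--     for root in range(12):
--         for i, mode in enumerate((MAJOR, MINOR)):
--             score = tally.get((root, i), 0)
--             if score > best_score:
--                 best_root, best_mode, best_score = root, mode, score
--     return {(best_root + s) % 12 for s in best_mode}
-- ===== Notes on version B (the rewrite author's own statement) =====
-- stated objective: alternative
-- what changed: Instead of scoring each of the 24 candidate scales by building its pitch-class set and intersecting it with the observed set, B makes one voting pass over the distinct observed pitch classes, incrementing a (root, mode) tally dict for every candidate containing the pitch, then reads the table in root-major/minor order with the same strict-greater first-max tie-break.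
import Mathlib
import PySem

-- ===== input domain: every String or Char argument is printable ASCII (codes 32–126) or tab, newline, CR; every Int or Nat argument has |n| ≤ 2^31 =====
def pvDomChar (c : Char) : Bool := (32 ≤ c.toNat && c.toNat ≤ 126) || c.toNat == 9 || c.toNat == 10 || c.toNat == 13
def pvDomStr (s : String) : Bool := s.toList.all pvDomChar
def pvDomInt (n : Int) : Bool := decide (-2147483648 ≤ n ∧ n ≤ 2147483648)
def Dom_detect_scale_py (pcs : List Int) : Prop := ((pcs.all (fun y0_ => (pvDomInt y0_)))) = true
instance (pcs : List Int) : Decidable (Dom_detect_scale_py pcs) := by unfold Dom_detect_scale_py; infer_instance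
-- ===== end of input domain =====

-- B replaces A's per-candidate set intersections with one voting pass over the distinct
-- pitch classes into a (root, mode) tally dict, then a table argmax (same tie-break).

-- ===== PORT A =====
def pvMajor : List Int := [0, 2, 4, 5, 7, 9, 11]
def pvMinor : List Int := [0, 2, 3, 5, 7, 8, 10]

def detect_scale_py (pcs : List Int) : List Int :=
  if pcs = [] then PySem.Set.ofList (PySem.List.pyRange 0 12 1)
  else
    let unique : PySem.Set Int := PySem.Set.ofList pcs
    let best := (PySem.List.pyRange 0 12 1).foldl (fun st root =>
        [pvMajor, pvMinor].foldl (fun st mode =>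
          let scale_pcs : PySem.Set Int :=
            PySem.Set.ofList (mode.map (fun s => PySem.Int.mod (root + s) 12))
          let score : Int := (PySem.Set.inter unique scale_pcs).length
          if score > st.2.2 then (root, mode, score) else st) st)
      ((0 : Int), pvMajor, (-1 : Int))
    PySem.Set.ofList (best.2.1.map (fun s => PySem.Int.mod (best.1 + s) 12))

-- ===== PORT B =====
def detect_scale_py_alt (pcs : List Int) : List Int :=
  if pcs = [] then PySem.Set.ofList (PySem.List.pyRange 0 12 1)
  else
    let tally : PySem.Dict (Int × Int) Int :=
      (PySem.Set.ofList pcs).foldl (fun t p =>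
        if 0 ≤ p ∧ p < 12 then
          (PySem.List.enumerate [pvMajor, pvMinor]).foldl (fun t im =>
            im.2.foldl (fun t s =>
              t.modify (PySem.Int.mod (p - s) 12, im.1) 0 (· + 1)) t) t
        else t) PySem.Dict.empty
    let best := (PySem.List.pyRange 0 12 1).foldl (fun st root =>
        (PySem.List.enumerate [pvMajor, pvMinor]).foldl (fun st im =>
          let score : Int := tally.getD (root, im.1) 0
          if score > st.2.2 then (root, im.2, score) else st) st)
      ((0 : Int), pvMajor, (-1 : Int))
    PySem.Set.ofList (best.2.1.map (fun s => PySem.Int.mod (best.1 + s) 12))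

-- ===== PRECONDITION & SPEC =====
def Spec_detect_scale_py (pcs : List Int) (out : List Int) : Prop := out = detect_scale_py_alt pcs
instance (pcs : List Int) (out : List Int) : Decidable (Spec_detect_scale_py pcs out) := by unfold Spec_detect_scale_py; infer_instance

-- ===== CLAIM (what is proved, stated in full; the proofs are below) =====
def Claim_equal_detect_scale_py : Prop := ∀ (pcs : List Int), Dom_detect_scale_py pcs → Spec_detect_scale_py pcs (detect_scale_py pcs)

-- ===== LEMMAS AND PROOFS =====

-- the scale (as a list of pitch classes) of candidate (root r, mode i) with i = 0 major, 1 minor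
def pvL (r i : Int) : List Int :=
  (if i = 0 then pvMajor else pvMinor).map (fun s => PySem.Int.mod (r + s) 12)

-- number of distinct observed pitch classes contained in candidate (r, i)
def pvCnt (u : List Int) (r i : Int) : Int :=
  (u.countP (fun p => decide (p ∈ pvL r i)) : Int)

-- A's score of candidate (r, i)
def pvFA (pcs : List Int) (r i : Int) : Int :=
  ((PySem.Set.inter (PySem.Set.ofList pcs) (PySem.Set.ofList (pvL r i))).length : Int)

-- A's selection step (same syntax tree as the inner loop of port A)
def pvStepA (unique : PySem.Set Int) (st : Int × List Int × Int) (root : Int) :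
    Int × List Int × Int :=
  [pvMajor, pvMinor].foldl (fun st mode =>
    let scale_pcs : PySem.Set Int :=
      PySem.Set.ofList (mode.map (fun s => PySem.Int.mod (root + s) 12))
    let score : Int := (PySem.Set.inter unique scale_pcs).length
    if score > st.2.2 then (root, mode, score) else st) st

-- B's tally dict (same syntax tree as the first loop of port B)
def pvTally (pcs : List Int) : PySem.Dict (Int × Int) Int :=
  (PySem.Set.ofList pcs).foldl (fun t p =>
    if 0 ≤ p ∧ p < 12 then
      (PySem.List.enumerate [pvMajor, pvMinor]).foldl (fun t im =>
        im.2.foldl (fun t s =>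
          t.modify (PySem.Int.mod (p - s) 12, im.1) 0 (· + 1)) t) t
    else t) PySem.Dict.empty

def pvFB (pcs : List Int) (r i : Int) : Int := (pvTally pcs).getD (r, i) 0

-- B's selection step (same syntax tree as the inner loop of port B)
def pvStepB (tally : PySem.Dict (Int × Int) Int) (st : Int × List Int × Int) (root : Int) :
    Int × List Int × Int :=
  (PySem.List.enumerate [pvMajor, pvMinor]).foldl (fun st im =>
    let score : Int := tally.getD (root, im.1) 0
    if score > st.2.2 then (root, im.2, score) else st) st

-- the shared selection-loop shape, abstracted over the score function
def pvSelStep (f : Int → Int → Int) (st : Int × List Int × Int) (root : Int) :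
    Int × List Int × Int :=
  let st1 := if f root 0 > st.2.2 then (root, pvMajor, f root 0) else st
  if f root 1 > st1.2.2 then (root, pvMinor, f root 1) else st1

def pvSel (f : Int → Int → Int) : Int × List Int × Int :=
  (PySem.List.pyRange 0 12 1).foldl (pvSelStep f) ((0 : Int), pvMajor, (-1 : Int))

def pvRebuild (st : Int × List Int × Int) : List Int :=
  PySem.Set.ofList (st.2.1.map (fun s => PySem.Int.mod (st.1 + s) 12))

-- the 14 votes cast by one in-range pitch class p
def pvVotes (p : Int) : List (Int × Int) :=
  pvMajor.map (fun s => (PySem.Int.mod (p - s) 12, (0 : Int))) ++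
  pvMinor.map (fun s => (PySem.Int.mod (p - s) 12, (1 : Int)))

lemma pv_mem_L_bounds (r i p : Int) (hp : p ∈ pvL r i) : 0 ≤ p ∧ p < 12 := by
  simp only [pvL, List.mem_map] at hp
  obtain ⟨s, _, rfl⟩ := hp
  exact ⟨PySem.Int.mod_nonneg _ (by norm_num), PySem.Int.mod_lt _ (by norm_num)⟩

set_option maxHeartbeats 1000000 in
lemma pv_votes_count (p r i : Int) (hp0 : 0 ≤ p) (hp1 : p < 12)
    (hr0 : 0 ≤ r) (hr1 : r < 12) (hi : i = 0 ∨ i = 1) :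
    ((pvVotes p).count (r, i) : Int) = if p ∈ pvL r i then 1 else 0 := by
  rcases hi with rfl | rfl <;>
    interval_cases r <;> interval_cases p <;> decide

set_option maxHeartbeats 1000000 in
lemma pv_tally_getD (u : List Int) (t : PySem.Dict (Int × Int) Int) (r i : Int)
    (hr0 : 0 ≤ r) (hr1 : r < 12) (hi : i = 0 ∨ i = 1) :
    (u.foldl (fun t p =>
        if 0 ≤ p ∧ p < 12 then
          (PySem.List.enumerate [pvMajor, pvMinor]).foldl (fun t im =>
            im.2.foldl (fun t s =>
              t.modify (PySem.Int.mod (p - s) 12, im.1) 0 (· + 1)) t) t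
        else t) t).getD (r, i) 0
      = t.getD (r, i) 0 + pvCnt u r i := by
  induction u generalizing t with
  | nil =>
    simp only [List.foldl_nil, pvCnt, List.countP_nil, Nat.cast_zero, add_zero]
  | cons p u ih =>
    simp only [List.foldl_cons]
    rw [ih]
    by_cases hp : 0 ≤ p ∧ p < 12
    · rw [if_pos hp]
      have hstep : (PySem.List.enumerate [pvMajor, pvMinor]).foldl (fun t im =>
            im.2.foldl (fun t s =>
              t.modify (PySem.Int.mod (p - s) 12, im.1) 0 (· + 1)) t) t
          = (pvVotes p).foldl (fun t k => t.modify k 0 (· + 1)) t := by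
        simp only [PySem.List.enumerate_cons, PySem.List.enumerate_nil, pvVotes, pvMajor,
          pvMinor, List.map_cons, List.map_nil, List.foldl_cons, List.foldl_nil,
          List.cons_append, List.nil_append, zero_add]
      rw [hstep, PySem.Dict.getD_foldl_modify_add_one]
      rw [pv_votes_count p r i hp.1 hp.2 hr0 hr1 hi]
      simp only [pvCnt, List.countP_cons]
      by_cases hm : p ∈ pvL r i
      · simp only [hm, decide_true, if_pos]
        push_cast
        ring
      · simp only [hm, decide_false, if_neg, Bool.false_eq_true, not_false_iff]
        push_cast
        ring
    · rw [if_neg hp]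
      have hm : p ∉ pvL r i := fun h => hp (pv_mem_L_bounds r i p h)
      simp only [pvCnt, List.countP_cons, hm, decide_false, Bool.false_eq_true, if_neg,
        not_false_iff]
      push_cast
      ring

lemma pv_scoreA_eq (pcs : List Int) (r i : Int) :
    pvFA pcs r i = pvCnt (PySem.Set.ofList pcs) r i := by
  have hcont : ∀ p : Int, (PySem.Set.ofList (pvL r i)).contains p = decide (p ∈ pvL r i) := by
    intro p
    by_cases hp : p ∈ pvL r i <;> simp [hp, PySem.Set.mem_ofList]
  simp only [pvFA, pvCnt, PySem.Set.inter]
  rw [← List.countP_eq_length_filter]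
  exact congrArg _ (List.countP_congr (fun p _ => by rw [hcont p]))

lemma pv_scoreB_eq (pcs : List Int) (r i : Int)
    (hr0 : 0 ≤ r) (hr1 : r < 12) (hi : i = 0 ∨ i = 1) :
    pvFB pcs r i = pvCnt (PySem.Set.ofList pcs) r i := by
  unfold pvFB pvTally
  rw [pv_tally_getD _ _ r i hr0 hr1 hi]
  have h0 : (PySem.Dict.empty : PySem.Dict (Int × Int) Int).getD (r, i) 0 = 0 := rfl
  rw [h0, zero_add]

lemma pvSel_congr (f g : Int → Int → Int)
    (h : ∀ r, 0 ≤ r → r < 12 → f r 0 = g r 0 ∧ f r 1 = g r 1) : pvSel f = pvSel g := by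
  unfold pvSel
  apply PySem.List.foldl_congr_mem
  intro acc x hx
  have hb := PySem.List.mem_pyRange_one.mp hx
  unfold pvSelStep
  rw [(h x hb.1 hb.2).1, (h x hb.1 hb.2).2]

lemma pv_stepA_eq (pcs : List Int) (st : Int × List Int × Int) (root : Int) :
    pvStepA (PySem.Set.ofList pcs) st root = pvSelStep (pvFA pcs) st root := rfl

lemma pv_stepB_eq (pcs : List Int) (st : Int × List Int × Int) (root : Int) :
    pvStepB (pvTally pcs) st root = pvSelStep (pvFB pcs) st root := rfl

-- ===== VERDICT (by name: the statement is the Claim_ definition above) =====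
set_option maxRecDepth 4000 in
set_option maxHeartbeats 4000000 in
theorem detect_scale_py_spec : Claim_equal_detect_scale_py := by
  intro pcs _
  unfold Spec_detect_scale_py
  by_cases h : pcs = []
  · subst h; decide
  · have eA : detect_scale_py pcs
        = pvRebuild ((PySem.List.pyRange 0 12 1).foldl (pvStepA (PySem.Set.ofList pcs))
            ((0 : Int), pvMajor, (-1 : Int))) := by
      unfold detect_scale_py
      rw [if_neg h]
      rfl
    have eB : detect_scale_py_alt pcs
        = pvRebuild ((PySem.List.pyRange 0 12 1).foldl (pvStepB (pvTally pcs))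
            ((0 : Int), pvMajor, (-1 : Int))) := by
      unfold detect_scale_py_alt
      rw [if_neg h]
      rfl
    rw [eA, eB]
    refine congrArg pvRebuild ?_
    have hA : (PySem.List.pyRange 0 12 1).foldl (pvStepA (PySem.Set.ofList pcs))
        ((0 : Int), pvMajor, (-1 : Int)) = pvSel (pvFA pcs) := by
      unfold pvSel
      apply PySem.List.foldl_congr_mem
      intro acc x _
      exact pv_stepA_eq pcs acc x
    have hB : (PySem.List.pyRange 0 12 1).foldl (pvStepB (pvTally pcs))
        ((0 : Int), pvMajor, (-1 : Int)) = pvSel (pvFB pcs) := by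
      unfold pvSel
      apply PySem.List.foldl_congr_mem
      intro acc x _
      exact pv_stepB_eq pcs acc x
    rw [hA, hB]
    apply pvSel_congr
    intro r hr0 hr1
    exact ⟨by rw [pv_scoreA_eq, pv_scoreB_eq pcs r 0 hr0 hr1 (Or.inl rfl)],
           by rw [pv_scoreA_eq, pv_scoreB_eq pcs r 1 hr0 hr1 (Or.inr rfl)]⟩
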